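-- pv_equiv track=rewrite | github.com/g4vil/adventOfCode | day3/binaryDiagnostic.py | makeDecimals
-- ===== SOURCE A (Python) =====
-- def makeDecimals(gamma, epsilon):
--     gamma_decimal = 0
--     epsilon_decimal = 0
--     gamma, epsilon = gamma[::-1], epsilon[::-1]
--     for i in range(len(gamma)):
--         if gamma[i] == '0':
--             pass
--         elif gamma[i] == '1':
--             gamma_decimal += 2**i
--
--     for i in range(len(epsilon)):
--         if epsilon[i] == '0':
--             pass
--         else:
--             epsilon_decimal += 2**i
--
--     return gamma_decimal * epsilon_decimal
-- ===== SOURCE B (Python) =====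
-- def makeDecimals(gamma, epsilon):
--     g = 0
--     for c in gamma:
--         g = g * 2 + (1 if c == '1' else 0)
--     e = 0
--     for c in epsilon:
--         e = e * 2 + (0 if c == '0' else 1)
--     return g * e
-- ===== Notes on version B (the rewrite author's own statement) =====
-- stated objective: faster
-- what changed: Replaces the reversal plus per-index 2**i accumulation with a left-to-right Horner scan keeping a running total (acc*2 + bit), preserving A's asymmetric bit rules for gamma and epsilon.
import Mathlib
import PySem

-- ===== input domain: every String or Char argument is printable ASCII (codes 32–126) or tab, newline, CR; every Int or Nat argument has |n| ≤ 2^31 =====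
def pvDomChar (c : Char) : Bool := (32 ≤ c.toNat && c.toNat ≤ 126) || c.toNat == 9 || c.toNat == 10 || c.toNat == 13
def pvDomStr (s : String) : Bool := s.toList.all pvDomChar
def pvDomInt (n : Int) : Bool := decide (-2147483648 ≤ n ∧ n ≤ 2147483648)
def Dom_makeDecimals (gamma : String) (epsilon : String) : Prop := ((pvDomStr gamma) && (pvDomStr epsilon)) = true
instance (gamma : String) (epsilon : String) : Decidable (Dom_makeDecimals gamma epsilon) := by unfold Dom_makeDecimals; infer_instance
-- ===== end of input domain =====

-- B replaces A's string reversal + per-index 2**i accumulation by a left-to-right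
-- Horner scan (acc*2 + bit), keeping A's asymmetric bit rules; objective: faster (avoids per-index 2**i powers).

-- ===== PORT A =====
-- loop 'for i in range(len(gamma))' over the reversed string: structural recursion
-- carrying the index i and the accumulator (exact: i is always in range).
def pvGammaLoop : List Char → Nat → Int → Int
  | [], _, acc => acc
  | c :: rest, i, acc =>
      pvGammaLoop rest (i + 1) (if c = '0' then acc else if c = '1' then acc + 2 ^ i else acc)

def pvEpsLoop : List Char → Nat → Int → Int
  | [], _, acc => acc
  | c :: rest, i, acc =>
      pvEpsLoop rest (i + 1) (if c = '0' then acc else acc + 2 ^ i)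

def makeDecimals (gamma : String) (epsilon : String) : Int :=
  -- gamma[::-1], epsilon[::-1]
  let g := gamma.toList.reverse
  let e := epsilon.toList.reverse
  pvGammaLoop g 0 0 * pvEpsLoop e 0 0

-- ===== PORT B =====
def makeDecimals_alt (gamma : String) (epsilon : String) : Int :=
  let g := gamma.toList.foldl (fun acc c => acc * 2 + (if c = '1' then 1 else 0)) 0
  let e := epsilon.toList.foldl (fun acc c => acc * 2 + (if c = '0' then 0 else 1)) 0
  g * e

-- ===== PRECONDITION & SPEC =====
def Spec_makeDecimals (gamma : String) (epsilon : String) (out : Int) : Prop := out = makeDecimals_alt gamma epsilon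
instance (gamma : String) (epsilon : String) (out : Int) : Decidable (Spec_makeDecimals gamma epsilon out) := by unfold Spec_makeDecimals; infer_instance

-- ===== CLAIM (what is proved, stated in full; the proofs are below) =====
def Claim_equal_makeDecimals : Prop := ∀ (gamma : String) (epsilon : String), Dom_makeDecimals gamma epsilon → Spec_makeDecimals gamma epsilon (makeDecimals gamma epsilon)

-- ===== LEMMAS AND PROOFS =====
def pvHorner (bit : Char → Int) (l : List Char) : Int :=
  l.foldl (fun acc c => acc * 2 + bit c) 0

theorem pvHorner_append (bit : Char → Int) (l : List Char) (c : Char) :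
    pvHorner bit (l ++ [c]) = pvHorner bit l * 2 + bit c := by
  simp [pvHorner]

theorem pvGammaLoop_eq (l : List Char) (i : Nat) (acc : Int) :
    pvGammaLoop l i acc = acc + 2 ^ i * pvHorner (fun c => if c = '1' then 1 else 0) l.reverse := by
  induction l generalizing i acc with
  | nil => simp [pvGammaLoop, pvHorner]
  | cons c rest ih =>
      simp only [pvGammaLoop, List.reverse_cons, ih, pvHorner_append, pow_succ]
      split_ifs with h0 h1
      · exact absurd (h0.symm.trans h1) (by decide)
      · ring
      · ring
      · ring

theorem pvEpsLoop_eq (l : List Char) (i : Nat) (acc : Int) :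
    pvEpsLoop l i acc = acc + 2 ^ i * pvHorner (fun c => if c = '0' then 0 else 1) l.reverse := by
  induction l generalizing i acc with
  | nil => simp [pvEpsLoop, pvHorner]
  | cons c rest ih =>
      simp only [pvEpsLoop, List.reverse_cons, ih, pvHorner_append, pow_succ]
      split_ifs <;> ring

-- ===== VERDICT (by name: the statement is the Claim_ definition above) =====
theorem makeDecimals_spec : Claim_equal_makeDecimals := by
  intro gamma epsilon _
  show makeDecimals gamma epsilon = makeDecimals_alt gamma epsilon
  simp [makeDecimals, makeDecimals_alt, pvGammaLoop_eq, pvEpsLoop_eq, pvHorner]
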